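-- pv_equiv track=rewrite | github.com/umitdogu/proxysql-monitor | utils/ui_utils.py | highlight_match
-- ===== SOURCE A (Python) =====
-- def highlight_match(text, filter_text):
--     """
--     Highlight matching portions of text for filter visualization
--     Returns list of (text, is_highlight) tuples for rendering
--     """
--     if not filter_text or not text:
--         return [(str(text), False)]
--
--     result = []
--     text_str = str(text)
--     text_lower = text_str.lower()
--     filter_lower = filter_text.lower()
--     last_pos = 0
--
--     # Fuzzy match highlighting - find each filter char in order
--     for char in filter_lower:
--         pos = text_lower.find(char, last_pos)
--         if pos >= 0:
--             if pos > last_pos: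
--                 result.append((text_str[last_pos:pos], False))
--             result.append((text_str[pos], True))  # Highlighted char
--             last_pos = pos + 1
--
--     if last_pos < len(text_str):
--         result.append((text_str[last_pos:], False))
--
--     return result if result else [(text_str, False)]
-- ===== SOURCE B (Python) =====
-- def highlight_match(text, filter_text):
--     """
--     Highlight matching portions of text for filter visualization
--     Returns list of (text, is_highlight) tuples for rendering
--     """
--     if not filter_text or not text:
--         return [(str(text), False)]
--
--     text_str = str(text)
--     text_lower = text_str.lower()
--
--     # Inverted index: char -> ascending list of its positions in text_lower
--     positions = {}
--     for i, c in enumerate(text_lower):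
--         positions.setdefault(c, []).append(i)
--
--     # Greedy fuzzy match through the index: for each filter char take the
--     # first of its occurrences at or after last_pos (skip chars with none);
--     # a per-char cursor makes each occurrence list be scanned at most once
--     ptr = {}
--     matched = []
--     last_pos = 0
--     for c in filter_text.lower():
--         lst = positions.get(c, ())
--         k = ptr.get(c, 0)
--         while k < len(lst) and lst[k] < last_pos:
--             k += 1
--         if k < len(lst):
--             matched.append(lst[k])
--             last_pos = lst[k] + 1
--             k += 1
--         ptr[c] = k
--
--     # Single run-grouping pass over the original characters
--     matched_set = set(matched)
--     result = []
--     run_start = 0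
--     for i in range(len(text_str)):
--         if i in matched_set:
--             if run_start < i:
--                 result.append((text_str[run_start:i], False))
--             result.append((text_str[i], True))
--             run_start = i + 1
--     if run_start < len(text_str):
--         result.append((text_str[run_start:], False))
--
--     return result if result else [(text_str, False)]
-- ===== Notes on version B (the rewrite author's own statement) =====
-- stated objective: alternative
-- what changed: B builds a per-character inverted index of positions once and resolves each filter character through that index with a per-character cursor (each occurrence list is scanned at most once), then renders the segments in a separate run-grouping pass, instead of A's repeated str.find scans over the text interleaved with slice-based segment appending.
import Mathlib
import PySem

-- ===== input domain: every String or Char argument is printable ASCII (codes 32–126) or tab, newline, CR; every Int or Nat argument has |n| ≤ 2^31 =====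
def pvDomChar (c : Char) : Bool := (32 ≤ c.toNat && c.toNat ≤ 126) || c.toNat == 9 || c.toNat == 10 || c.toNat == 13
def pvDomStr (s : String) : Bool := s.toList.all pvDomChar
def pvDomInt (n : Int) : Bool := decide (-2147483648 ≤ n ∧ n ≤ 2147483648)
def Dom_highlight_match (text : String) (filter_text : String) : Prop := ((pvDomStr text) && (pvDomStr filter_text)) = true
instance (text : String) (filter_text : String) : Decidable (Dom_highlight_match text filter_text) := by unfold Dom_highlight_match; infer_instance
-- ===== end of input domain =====

-- B replaces A's repeated str.find scans + slice appends with a per-character inverted index of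
-- positions plus a separate run-grouping rendering pass (objective: alternative, not faster).

-- ===== PORT A =====
-- text_str[pos] as a one-character string: everywhere it is used, pos is a valid index
-- (it comes from a successful find / from range(len(text_str))), so the none branch is unreachable.
def pvCharAt (s : String) (i : Int) : String :=
  match PySem.Str.pyGet? s i with
  | some c => String.ofList [c]
  | none => ""

def highlight_match (text : String) (filter_text : String) : List (String × Bool) :=
  if filter_text.toList = [] ∨ text.toList = [] then
    [(text, false)]
  else
    let text_str := text
    let text_lower := PySem.Str.lower text_str
    let filter_lower := PySem.Str.lower filter_text
    -- for char in filter_lower: … (state: result, last_pos)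
    let st := filter_lower.toList.foldl (fun (st : List (String × Bool) × Int) char =>
        let pos := PySem.Str.findFrom text_lower (String.ofList [char]) st.2
        if 0 ≤ pos then
          let result := if st.2 < pos then
              st.1 ++ [(PySem.Str.slice text_str (some st.2) (some pos), false)]
            else st.1
          (result ++ [(pvCharAt text_str pos, true)], pos + 1)
        else st) ([], 0)
    let result := if st.2 < PySem.Str.len text_str then
        st.1 ++ [(PySem.Str.slice text_str (some st.2) none, false)]
      else st.1
    if result = [] then [(text_str, false)] else result

-- ===== PORT B =====
-- the 'while k < len(lst) and lst[k] < last_pos: k += 1' cursor-advance loop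
def pvSkipLt (lst : List Int) (lp : Int) (k : Int) : Int :=
  if h : k < (lst.length : Int) ∧ PySem.List.pyGetD lst k 0 < lp then
    pvSkipLt lst lp (k + 1)
  else k
termination_by ((lst.length : Int) - k).toNat
decreasing_by omega

def highlight_match_alt (text : String) (filter_text : String) : List (String × Bool) :=
  if filter_text.toList = [] ∨ text.toList = [] then
    [(text, false)]
  else
    let text_str := text
    let text_lower := PySem.Str.lower text_str
    -- positions.setdefault(c, []).append(i)  ==  modify c [] (· ++ [i])
    let positions := (PySem.List.enumerate text_lower.toList).foldl
        (fun (d : PySem.Dict Char (List Int)) p => d.modify p.2 [] (fun l => l ++ [p.1]))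
        PySem.Dict.empty
    -- for c in filter_text.lower(): advance c's cursor past positions < last_pos,
    -- then take lst[k] if the cursor is still inside the list (state: ptr, matched, last_pos)
    let mt := (PySem.Str.lower filter_text).toList.foldl
        (fun (st : PySem.Dict Char Int × List Int × Int) c =>
          let lst := positions.getD c []
          let k := pvSkipLt lst st.2.2 (st.1.getD c 0)
          if k < (lst.length : Int) then
            (st.1.insert c (k + 1), st.2.1 ++ [PySem.List.pyGetD lst k 0],
              PySem.List.pyGetD lst k 0 + 1)
          else
            (st.1.insert c k, st.2.1, st.2.2))
        ((PySem.Dict.empty : PySem.Dict Char Int), ([] : List Int), (0 : Int))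
    let matched_set : PySem.Set Int := PySem.Set.ofList mt.2.1
    -- single run-grouping pass over the characters
    let rt := (PySem.List.pyRange 0 (PySem.Str.len text_str)).foldl
        (fun (st : List (String × Bool) × Int) i =>
          if matched_set.contains i then
            let result := if st.2 < i then
                st.1 ++ [(PySem.Str.slice text_str (some st.2) (some i), false)]
              else st.1
            (result ++ [(pvCharAt text_str i, true)], i + 1)
          else st) ([], 0)
    let result := if rt.2 < PySem.Str.len text_str then
        rt.1 ++ [(PySem.Str.slice text_str (some rt.2) none, false)]
      else rt.1
    if result = [] then [(text_str, false)] else result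

-- ===== PRECONDITION & SPEC =====
def Spec_highlight_match (text : String) (filter_text : String) (out : List (String × Bool)) : Prop := out = highlight_match_alt text filter_text
instance (text : String) (filter_text : String) (out : List (String × Bool)) : Decidable (Spec_highlight_match text filter_text out) := by unfold Spec_highlight_match; infer_instance

-- ===== CLAIM (what is proved, stated in full; the proofs are below) =====
def Claim_equal_highlight_match : Prop := ∀ (text : String) (filter_text : String), Dom_highlight_match text filter_text → Spec_highlight_match text filter_text (highlight_match text filter_text)

-- ===== LEMMAS AND PROOFS =====

-- ascending list of the positions of c in tl (as B's inverted index stores them)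
def posList (tl : List Char) (c : Char) : List Int :=
  ((PySem.List.enumerate tl).filter (fun p => p.2 == c)).map (·.1)

-- the common matching skeleton: positions matched by the filter chars, and the final last_pos
def mrec (tl : List Char) : List Char → Int → List Int × Int
  | [], k => ([], k)
  | c :: cs, k =>
    match (posList tl c).find? (fun p => decide (k ≤ p)) with
    | some p => let r := mrec tl cs (p + 1); (p :: r.1, r.2)
    | none => mrec tl cs k

-- the segments both programs emit for a matched-position list, starting at k
def segs (s : String) : List Int → Int → List (String × Bool)
  | [], _ => []
  | p :: ps, k =>
    (if k < p then [(PySem.Str.slice s (some k) (some p), false)] else [])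
      ++ (pvCharAt s p, true) :: segs s ps (p + 1)

def endAfter (ms : List Int) (a : Int) : Int := ms.getLastD (a - 1) + 1

theorem lower_length (l : List Char) : (PySem.Chars.lower l).length = l.length := by
  simp [PySem.Chars.lower]

theorem mem_posList (tl : List Char) (c : Char) (x : Int) :
    x ∈ posList tl c ↔ ∃ (k : Nat) (h : k < tl.length), x = (k : Int) ∧ tl[k] = c := by
  simp only [posList, List.mem_map, List.mem_filter, PySem.List.mem_enumerate_iff, zero_add, beq_iff_eq,
    Prod.exists, Prod.mk.injEq, exists_and_left, exists_and_right, ↓existsAndEq, and_true, exists_eq_right]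

theorem single_prefix_drop (l : List Char) (c : Char) (i : Nat) (h : i < l.length) :
    [c] <+: l.drop i ↔ l[i] = c := by
  have : (l.drop i).head? = some l[i] := by
    rw [List.head?_drop]; simp [h]
  constructor
  · intro hp
    rcases hp with ⟨t, ht⟩
    rw [show l.drop i = c :: t from ht.symm] at this
    simpa [eq_comm] using this
  · intro hc
    cases h' : l.drop i with
    | nil => rw [h'] at this; simp at this
    | cons a t =>
      rw [h'] at this; simp at this
      exact ⟨t, by simp [this, hc]⟩


theorem pairwise_posList (tl : List Char) (c : Char) : (posList tl c).Pairwise (· < ·) := by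
  unfold posList
  refine List.Pairwise.map _ (fun a b h => h) ?_
  exact (PySem.List.pairwise_lt_enumerate tl 0).filter _

theorem posDict (tl : List Char) (c : Char) :
    ((PySem.List.enumerate tl).foldl
      (fun (d : PySem.Dict Char (List Int)) p => d.modify p.2 [] (fun l => l ++ [p.1]))
      PySem.Dict.empty).getD c [] = posList tl c := by
  have h := PySem.Dict.getD_foldl_modify_append ((PySem.List.enumerate tl).map Prod.swap)
      (PySem.Dict.empty : PySem.Dict Char (List Int)) c
  rw [List.foldl_map] at h
  simp only [Prod.swap] at h
  rw [h]
  simp [posList, List.filter_map, Function.comp_def]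

theorem find_eq (tl : List Char) (c : Char) (k : Int) (h0 : 0 ≤ k) (hk : k ≤ (tl.length : Int)) :
    PySem.Chars.findFrom tl [c] k none
      = ((posList tl c).find? (fun p => decide (k ≤ p))).getD (-1) := by
  set n := k.toNat with hn
  have hkn : k = (n : Int) := (Int.toNat_of_nonneg h0).symm
  have hnle : n ≤ tl.length := by omega
  cases hfind : (posList tl c).find? (fun p => decide (k ≤ p)) with
  | none =>
    rw [hkn, (PySem.Chars.findFrom_natCast_eq_neg_one_iff tl [c] n hnle).2]
    · simp
    · intro hinf
      rw [List.singleton_infix_iff] at hinf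
      rcases List.mem_iff_getElem.1 hinf with ⟨m, hm, hcm⟩
      have hdl : (List.drop n tl).length = tl.length - n := by simp
      rw [List.getElem_drop] at hcm
      have hmem : ((n + m : Nat) : Int) ∈ posList tl c := by
        rw [mem_posList]; exact ⟨n + m, by omega, rfl, hcm⟩
      have := List.find?_eq_none.1 hfind _ hmem
      simp at this; omega
  | some p =>
    rcases (mem_posList tl c p).1 (List.mem_of_find?_eq_some hfind) with ⟨j, hj, rfl, hcj⟩
    have hkp : k ≤ (j : Int) := by simpa using List.find?_some hfind
    have hne : PySem.Chars.findFrom tl [c] ((n : Nat) : Int) none ≠ -1 := by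
      rw [Ne, PySem.Chars.findFrom_natCast_eq_neg_one_iff tl [c] n hnle, not_not,
        List.singleton_infix_iff]
      have hdl : (List.drop n tl).length = tl.length - n := by simp
      have : (tl.drop n)[j - n]'(by omega) = c := by
        rw [List.getElem_drop]; simp [show n + (j - n) = j from by omega, hcj]
      exact List.mem_iff_getElem.2 ⟨j - n, by omega, this⟩
    rw [hkn] at *
    obtain ⟨hge, hpre, hmin⟩ := PySem.Chars.findFrom_natCast_spec tl [c] n hnle hne
    set r := PySem.Chars.findFrom tl [c] ((n : Nat) : Int) none with hr
    have hr0 : 0 ≤ r := le_trans (by omega) hge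
    have hrlen : r.toNat < tl.length := by
      rcases hpre with ⟨t, ht⟩
      have := congrArg List.length ht
      simp at this; omega
    have hcr : tl[r.toNat] = c := (single_prefix_drop tl c r.toNat hrlen).1 hpre
    -- r ≤ j
    have hrj : r.toNat ≤ j := by
      by_contra hlt
      exact hmin j (by omega) (by omega) ((single_prefix_drop tl c j hj).2 hcj)
    -- j ≤ r
    have hjr : (j : Int) ≤ r := by
      by_contra hlt
      push Not at hlt
      rcases List.find?_eq_some_iff_append.1 hfind with ⟨hp, as, bs, heq, has⟩
      have hmem : ((r.toNat : Nat) : Int) ∈ posList tl c := by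
        rw [mem_posList]; exact ⟨r.toNat, hrlen, rfl, hcr⟩
      rw [heq] at hmem
      rcases List.mem_append.1 hmem with hin | hin
      · have := has _ hin; simp at this; omega
      · rcases List.mem_cons.1 hin with hpe | hin
        · omega
        · have hpw := pairwise_posList tl c
          rw [heq] at hpw
          have := (List.pairwise_append.1 hpw).2.2
          have h2 := (List.pairwise_cons.1 (List.pairwise_append.1 hpw).2.1).1 _ hin
          omega
      
    simp only [Option.getD_some]
    omega

theorem mrec_props (tl : List Char) (fl : List Char) (k : Int) (h0 : 0 ≤ k)
    (hk : k ≤ (tl.length : Int)) :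
    (∀ q ∈ (mrec tl fl k).1, k ≤ q ∧ q < (tl.length : Int)) ∧
      (mrec tl fl k).1.Pairwise (· < ·) ∧
      k ≤ (mrec tl fl k).2 ∧ (mrec tl fl k).2 ≤ (tl.length : Int) := by
  induction fl generalizing k with
  | nil => simp [mrec]; omega
  | cons c cs ih =>
    simp only [mrec]
    cases h : (posList tl c).find? (fun p => decide (k ≤ p)) with
    | none => simpa using ih k h0 hk
    | some p =>
      have hp := (mem_posList tl c p).1 (List.mem_of_find?_eq_some h)
      rcases hp with ⟨j, hj, rfl, -⟩
      have hkp : k ≤ (j : Int) := by simpa using List.find?_some h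
      have hr := ih ((j : Int) + 1) (by omega) (by omega)
      try dsimp only
      refine ⟨?_, ?_, ?_, ?_⟩
      · intro q hq
        rcases List.mem_cons.1 hq with rfl | hq
        · constructor <;> [omega; exact_mod_cast hj]
        · have := hr.1 q hq; omega
      · exact List.pairwise_cons.2 ⟨fun q hq => by have := hr.1 q hq; omega, hr.2.1⟩
      · have := hr.2.2.1; omega
      · exact hr.2.2.2

theorem mrec_end (tl : List Char) (fl : List Char) (k : Int) :
    (mrec tl fl k).2 = endAfter (mrec tl fl k).1 k := by
  induction fl generalizing k with
  | nil => simp [mrec, endAfter]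
  | cons c cs ih =>
    simp only [mrec]
    cases h : (posList tl c).find? (fun p => decide (k ≤ p)) with
    | none => exact ih k
    | some p =>
      try dsimp only
      rw [show endAfter (p :: (mrec tl cs (p + 1)).1) k = endAfter (mrec tl cs (p + 1)).1 (p + 1) from
        by unfold endAfter; rw [List.getLastD_cons]; norm_num]
      exact ih (p + 1)

def stepA (s : String) (st : List (String × Bool) × Int) (char : Char) :
    List (String × Bool) × Int :=
  let pos := PySem.Str.findFrom (PySem.Str.lower s) (String.ofList [char]) st.2
  if 0 ≤ pos then
    let result := if st.2 < pos then
        st.1 ++ [(PySem.Str.slice s (some st.2) (some pos), false)]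
      else st.1
    (result ++ [(pvCharAt s pos, true)], pos + 1)
  else st

theorem stepA_eq (s : String) (res : List (String × Bool)) (k : Int) (c : Char)
    (h0 : 0 ≤ k) (hk : k ≤ (s.toList.length : Int)) :
    stepA s (res, k) c
      = (match (posList (PySem.Chars.lower s.toList) c).find? (fun p => decide (k ≤ p)) with
        | none => (res, k)
        | some p => ((if k < p then res ++ [(PySem.Str.slice s (some k) (some p), false)] else res)
            ++ [(pvCharAt s p, true)], p + 1)) := by
  have hlen : (PySem.Chars.lower s.toList).length = s.toList.length := lower_length _
  have hfe : PySem.Str.findFrom (PySem.Str.lower s) (String.ofList [c]) k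
      = ((posList (PySem.Chars.lower s.toList) c).find? (fun p => decide (k ≤ p))).getD (-1) := by
    rw [PySem.Str.findFrom_eq, PySem.Str.toList_lower,
      show (String.ofList [c]).toList = [c] from by simp]
    exact find_eq _ c k h0 (by omega)
  unfold stepA
  dsimp only
  rw [hfe]
  cases hcase : (posList (PySem.Chars.lower s.toList) c).find? (fun p => decide (k ≤ p)) with
  | none =>
    simp only [Option.getD_none]
    rw [if_neg (by norm_num)]
  | some p =>
    rcases (mem_posList _ c p).1 (List.mem_of_find?_eq_some hcase) with ⟨j, hj, rfl, -⟩
    simp only [Option.getD_some]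
    rw [if_pos (by positivity)]

theorem foldA (s : String) (fl : List Char) (k : Int) (res : List (String × Bool))
    (h0 : 0 ≤ k) (hk : k ≤ (s.toList.length : Int)) :
    fl.foldl (stepA s) (res, k)
    = (res ++ segs s (mrec (PySem.Chars.lower s.toList) fl k).1 k,
       (mrec (PySem.Chars.lower s.toList) fl k).2) := by
  induction fl generalizing k res with
  | nil => simp [mrec, segs]
  | cons c cs ih =>
    rw [List.foldl_cons, stepA_eq s res k c h0 hk]
    cases hcase : (posList (PySem.Chars.lower s.toList) c).find? (fun p => decide (k ≤ p)) with
    | none =>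
      try dsimp only
      rw [ih k res h0 hk]
      simp only [mrec, hcase]
    | some p =>
      rcases (mem_posList _ c p).1 (List.mem_of_find?_eq_some hcase) with ⟨j, hj, rfl, -⟩
      have hkp : k ≤ (j : Int) := by simpa using List.find?_some hcase
      have hlen : (PySem.Chars.lower s.toList).length = s.toList.length := lower_length _
      try dsimp only
      rw [ih ((j : Int) + 1) _ (by omega) (by omega)]
      simp only [mrec, hcase]
      try dsimp only
      simp only [segs]
      split_ifs <;> simp

theorem skipLt_basic (l : List Int) (lp : Int) :
    ∀ (n : Nat) (k : Int), (((l.length : Int) - k).toNat = n) → 0 ≤ k → k ≤ (l.length : Int) →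
    (∀ x ∈ l.take k.toNat, x < lp) →
    k ≤ pvSkipLt l lp k ∧ pvSkipLt l lp k ≤ (l.length : Int) ∧
    (∀ x ∈ l.take (pvSkipLt l lp k).toNat, x < lp) ∧
    (pvSkipLt l lp k < (l.length : Int) → lp ≤ PySem.List.pyGetD l (pvSkipLt l lp k) 0) := by
  intro n
  induction n with
  | zero =>
    intro k hn h0 hk hpre
    rw [pvSkipLt, dif_neg (by omega)]
    exact ⟨le_rfl, hk, hpre, by omega⟩
  | succ m ih =>
    intro k hn h0 hk hpre
    rw [pvSkipLt]
    by_cases hcond : k < (l.length : Int) ∧ PySem.List.pyGetD l k 0 < lp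
    · rw [dif_pos hcond]
      have hpre' : ∀ x ∈ l.take (k + 1).toNat, x < lp := by
        intro x hx
        have hkk : (k + 1).toNat = k.toNat + 1 := by omega
        rw [hkk, List.take_add_one] at hx
        rcases List.mem_append.1 hx with hx | hx
        · exact hpre x hx
        · have hklen : k.toNat < l.length := by omega
          simp [List.getElem?_eq_getElem hklen] at hx
          have : PySem.List.pyGetD l k 0 = l[k.toNat] :=
            PySem.List.pyGetD_eq_getElem l 0 h0 (by omega)
          omega
      have h := ih (k + 1) (by omega) (by omega) (by omega) hpre'
      exact ⟨by omega, h.2.1, h.2.2.1, h.2.2.2⟩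
    · rw [dif_neg hcond]
      refine ⟨le_rfl, hk, hpre, fun hlt => ?_⟩
      omega

theorem find?_of_take (l : List Int) (lp : Int) (k : Int) (h0 : 0 ≤ k) (hk : k ≤ (l.length : Int))
    (hpre : ∀ x ∈ l.take k.toNat, x < lp) :
    (k < (l.length : Int) → lp ≤ PySem.List.pyGetD l k 0 →
      l.find? (fun p => decide (lp ≤ p)) = some (PySem.List.pyGetD l k 0)) ∧
    (¬ k < (l.length : Int) → l.find? (fun p => decide (lp ≤ p)) = none) := by
  have hsplit : l = l.take k.toNat ++ l.drop k.toNat := (List.take_append_drop _ l).symm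
  have htake : (l.take k.toNat).find? (fun p => decide (lp ≤ p)) = none :=
    List.find?_eq_none.2 (fun x hx => by have := hpre x hx; simp; omega)
  constructor
  · intro hlt hge
    have hkl : k.toNat < l.length := by omega
    have hget : PySem.List.pyGetD l k 0 = l[k.toNat] :=
      PySem.List.pyGetD_eq_getElem l 0 h0 (by omega)
    have hdrop : l.drop k.toNat = l[k.toNat] :: l.drop (k.toNat + 1) :=
      (List.getElem_cons_drop hkl).symm
    conv_lhs => rw [hsplit]
    rw [List.find?_append, htake, Option.none_or, hdrop,
      List.find?_cons_of_pos (by rw [hget] at hge; simpa using hge), hget]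
  · intro hge
    have : l.drop k.toNat = [] := by
      have : k.toNat = l.length := by omega
      simp [this]
    conv_lhs => rw [hsplit]
    rw [List.find?_append, htake, Option.none_or, this]
    rfl

def PtrInv (tl : List Char) (ptr : PySem.Dict Char Int) (lp : Int) : Prop :=
  ∀ c : Char, 0 ≤ ptr.getD c 0 ∧ ptr.getD c 0 ≤ ((posList tl c).length : Int) ∧
    ∀ x ∈ (posList tl c).take (ptr.getD c 0).toNat, x < lp

def stepB (positions : PySem.Dict Char (List Int)) (st : PySem.Dict Char Int × List Int × Int)
    (c : Char) : PySem.Dict Char Int × List Int × Int :=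
  let lst := positions.getD c []
  let k := pvSkipLt lst st.2.2 (st.1.getD c 0)
  if k < (lst.length : Int) then
    (st.1.insert c (k + 1), st.2.1 ++ [PySem.List.pyGetD lst k 0],
      PySem.List.pyGetD lst k 0 + 1)
  else
    (st.1.insert c k, st.2.1, st.2.2)

theorem foldB (tl : List Char) (positions : PySem.Dict Char (List Int))
    (hpos : ∀ c, positions.getD c [] = posList tl c) (fl : List Char) :
    ∀ (k : Int) (res : List Int) (ptr : PySem.Dict Char Int), PtrInv tl ptr k →
    ∃ ptr', fl.foldl (stepB positions) (ptr, res, k)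
        = (ptr', res ++ (mrec tl fl k).1, (mrec tl fl k).2) ∧
      PtrInv tl ptr' (mrec tl fl k).2 := by
  induction fl with
  | nil => exact fun k res ptr hinv => ⟨ptr, by simp [mrec], hinv⟩
  | cons c cs ih =>
    intro k res ptr hinv
    rw [List.foldl_cons]
    obtain ⟨hc0, hclen, hcpre⟩ := hinv c
    set l := posList tl c with hl
    set k' := pvSkipLt l k (ptr.getD c 0) with hk'
    have hbasic := skipLt_basic l k (((l.length : Int) - ptr.getD c 0).toNat) (ptr.getD c 0)
      rfl hc0 hclen hcpre
    have hfind := find?_of_take l k k' (by omega) hbasic.2.1 hbasic.2.2.1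
    have hstep : stepB positions (ptr, res, k) c
        = if k' < ((l.length : Int)) then
            (ptr.insert c (k' + 1), res ++ [PySem.List.pyGetD l k' 0],
              PySem.List.pyGetD l k' 0 + 1)
          else (ptr.insert c k', res, k) := by
      unfold stepB
      dsimp only
      rw [hpos c, ← hl, ← hk']
    by_cases hlt : k' < (l.length : Int)
    · have hf := hfind.1 hlt (hbasic.2.2.2 hlt)
      set p := PySem.List.pyGetD l k' 0 with hp
      have hmrec : mrec tl (c :: cs) k = (p :: (mrec tl cs (p + 1)).1, (mrec tl cs (p + 1)).2) := by
        simp only [mrec, ← hl, hf]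
      have hinv' : PtrInv tl (ptr.insert c (k' + 1)) (p + 1) := by
        intro c'
        rw [PySem.Dict.getD_insert]
        by_cases hcc : c' = c
        · rw [if_pos hcc]
          subst hcc
          rw [← hl]
          refine ⟨by omega, by omega, ?_⟩
          intro x hx
          have hkk : (k' + 1).toNat = k'.toNat + 1 := by omega
          rw [hkk, List.take_add_one] at hx
          rcases List.mem_append.1 hx with hx | hx
          · have h1 := hbasic.2.2.1 x hx
            have h2 := hbasic.2.2.2 hlt
            omega
          · have hklen : k'.toNat < l.length := by omega
            simp [List.getElem?_eq_getElem hklen] at hx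
            have : p = l[k'.toNat] := PySem.List.pyGetD_eq_getElem l 0 (by omega) (by omega)
            omega
        · rw [if_neg hcc]
          obtain ⟨h1, h2, h3⟩ := hinv c'
          refine ⟨h1, h2, fun x hx => ?_⟩
          have := h3 x hx
          have := hbasic.2.2.2 hlt
          omega
      obtain ⟨ptr', heq, hinv''⟩ := ih (p + 1) (res ++ [p]) (ptr.insert c (k' + 1)) hinv'
      refine ⟨ptr', ?_, ?_⟩
      · rw [hstep, if_pos hlt, heq, hmrec]
        simp
      · rw [hmrec]; exact hinv''
    · have hf := hfind.2 hlt
      have hmrec : mrec tl (c :: cs) k = mrec tl cs k := by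
        simp only [mrec, ← hl, hf]
      have hinv' : PtrInv tl (ptr.insert c k') k := by
        intro c'
        rw [PySem.Dict.getD_insert]
        by_cases hcc : c' = c
        · rw [if_pos hcc]
          subst hcc
          rw [← hl]
          exact ⟨by omega, hbasic.2.1, hbasic.2.2.1⟩
        · rw [if_neg hcc]
          exact hinv c'
      obtain ⟨ptr', heq, hinv''⟩ := ih k res (ptr.insert c k') hinv'
      refine ⟨ptr', ?_, ?_⟩
      · rw [hstep, if_neg hlt, heq, hmrec]
      · rw [hmrec]; exact hinv''

theorem PtrInv_empty (tl : List Char) : PtrInv tl PySem.Dict.empty 0 := by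
  intro c
  rw [PySem.Dict.getD_empty]
  exact ⟨le_rfl, by positivity, by simp⟩

theorem noMatchFold (s : String) (S : PySem.Set Int) (b : Int) :
    ∀ (n : Nat) (a : Int), (b - a).toNat = n →
    (∀ i : Int, a ≤ i → i < b → S.contains i = false) →
    ∀ st : List (String × Bool) × Int,
    (PySem.List.pyRange a b).foldl (fun (st : List (String × Bool) × Int) i =>
        if S.contains i then
          ((if st.2 < i then st.1 ++ [(PySem.Str.slice s (some st.2) (some i), false)] else st.1)
            ++ [(pvCharAt s i, true)], i + 1)
        else st) st = st := by
  intro n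
  induction n with
  | zero =>
    intro a hn h st
    rw [PySem.List.pyRange_one_eq_nil (by omega)]
    rfl
  | succ m ih =>
    intro a hn h st
    rw [PySem.List.pyRange_one_cons (by omega), List.foldl_cons]
    try dsimp only
    rw [h a le_rfl (by omega)]
    simp only [Bool.false_eq_true, if_false]
    exact ih (a + 1) (by omega) (fun i h1 h2 => h i (by omega) h2) st

theorem runLoop (s : String) (S : PySem.Set Int) (b : Int) (hb : b = (s.toList.length : Int)) :
    ∀ (ms : List Int) (a : Int) (res : List (String × Bool)),
    0 ≤ a → a ≤ b →
    (∀ q ∈ ms, a ≤ q ∧ q < b) → ms.Pairwise (· < ·) →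
    (∀ i : Int, a ≤ i → (S.contains i = true ↔ i ∈ ms)) →
    (PySem.List.pyRange a b).foldl (fun (st : List (String × Bool) × Int) i =>
        if S.contains i then
          ((if st.2 < i then st.1 ++ [(PySem.Str.slice s (some st.2) (some i), false)] else st.1)
            ++ [(pvCharAt s i, true)], i + 1)
        else st) (res, a)
      = (res ++ segs s ms a, endAfter ms a) := by
  intro ms
  induction ms with
  | nil =>
    intro a res h0 hab hq hpw hmem
    rw [noMatchFold s S b (b - a).toNat a rfl
      (fun i h1 _ => by
        have := hmem i h1
        simp only [List.not_mem_nil, iff_false] at this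
        exact Bool.not_eq_true _ ▸ (by simpa using this))]
    simp [segs, endAfter]
  | cons p ps ih =>
    intro a res h0 hab hq hpw hmem
    obtain ⟨hap, hpb⟩ := hq p List.mem_cons_self
    have hps : ∀ q ∈ ps, p < q := (List.pairwise_cons.1 hpw).1
    rw [PySem.List.pyRange_one_append a p b hap (by omega), List.foldl_append]
    rw [noMatchFold s S p (p - a).toNat a rfl
      (fun i h1 h2 => by
        have hm := hmem i h1
        have : i ∉ p :: ps := by
          intro hin
          rcases List.mem_cons.1 hin with rfl | hin
          · omega
          · have := hps i hin; omega
        simp only [this, iff_false] at hm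
        simpa using hm)]
    rw [PySem.List.pyRange_one_cons (show p < b by omega), List.foldl_cons]
    dsimp only
    rw [if_pos ((hmem p hap).2 List.mem_cons_self)]
    rw [ih (p + 1) _ (by omega) (by omega)
      (fun q hq' => ⟨by have := hps q hq'; omega, (hq q (List.mem_cons_of_mem _ hq')).2⟩)
      (List.pairwise_cons.1 hpw).2
      (fun i hi => by
        rw [hmem i (by omega)]
        constructor
        · intro hin
          rcases List.mem_cons.1 hin with rfl | hin
          · omega
          · exact hin
        · exact fun hin => List.mem_cons_of_mem _ hin)]
    simp only [segs]
    rw [show endAfter (p :: ps) a = endAfter ps (p + 1) from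
      by unfold endAfter; rw [List.getLastD_cons]; norm_num]
    split_ifs <;> simp

theorem contains_ofList_int (l : List Int) (i : Int) :
    (PySem.Set.ofList l).contains i = true ↔ i ∈ l := by
  simp [PySem.Set.contains, PySem.Set.mem_ofList]

theorem highlight_match_spec : Claim_equal_highlight_match := by
  unfold Claim_equal_highlight_match Spec_highlight_match
  intro text filter _
  by_cases hg : filter.toList = [] ∨ text.toList = []
  · simp only [highlight_match, highlight_match_alt]
    rw [if_pos hg, if_pos hg]
  · have hpos : (0:Int) ≤ (text.toList.length : Int) := by positivity
    have hlen : (PySem.Chars.lower text.toList).length = text.toList.length := lower_length _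
    simp only [highlight_match, highlight_match_alt, if_neg hg]
    rw [show (fun (st : List (String × Bool) × Int) char =>
        let pos := PySem.Str.findFrom (PySem.Str.lower text) (String.ofList [char]) st.2
        if 0 ≤ pos then
          let result := if st.2 < pos then
              st.1 ++ [(PySem.Str.slice text (some st.2) (some pos), false)]
            else st.1
          (result ++ [(pvCharAt text pos, true)], pos + 1)
        else st) = stepA text from rfl]
    simp only [PySem.Str.toList_lower, PySem.Str.len_eq]
    rw [foldA text (PySem.Chars.lower filter.toList) 0 [] le_rfl hpos]
    rw [show (fun (st : PySem.Dict Char Int × List Int × Int) c =>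
        let lst := ((PySem.List.enumerate (PySem.Chars.lower text.toList)).foldl
            (fun (d : PySem.Dict Char (List Int)) p => d.modify p.2 [] (fun l => l ++ [p.1]))
            PySem.Dict.empty).getD c []
        let k := pvSkipLt lst st.2.2 (st.1.getD c 0)
        if k < (lst.length : Int) then
          (st.1.insert c (k + 1), st.2.1 ++ [PySem.List.pyGetD lst k 0],
            PySem.List.pyGetD lst k 0 + 1)
        else
          (st.1.insert c k, st.2.1, st.2.2))
      = stepB ((PySem.List.enumerate (PySem.Chars.lower text.toList)).foldl
            (fun (d : PySem.Dict Char (List Int)) p => d.modify p.2 [] (fun l => l ++ [p.1]))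
            PySem.Dict.empty) from rfl]
    obtain ⟨ptr', hfold, -⟩ := foldB (PySem.Chars.lower text.toList)
      ((PySem.List.enumerate (PySem.Chars.lower text.toList)).foldl
          (fun (d : PySem.Dict Char (List Int)) p => d.modify p.2 [] (fun l => l ++ [p.1]))
          PySem.Dict.empty)
      (fun c => posDict (PySem.Chars.lower text.toList) c)
      (PySem.Chars.lower filter.toList) 0 [] PySem.Dict.empty
      (PtrInv_empty (PySem.Chars.lower text.toList))
    rw [hfold]
    rw [show ((ptr', ([] : List Int) ++ (mrec (PySem.Chars.lower text.toList) (PySem.Chars.lower filter.toList) 0).1,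
          (mrec (PySem.Chars.lower text.toList) (PySem.Chars.lower filter.toList) 0).2) :
            PySem.Dict Char Int × List Int × Int).2.1
        = (mrec (PySem.Chars.lower text.toList) (PySem.Chars.lower filter.toList) 0).1 from rfl]
    have hprops := mrec_props (PySem.Chars.lower text.toList) (PySem.Chars.lower filter.toList) 0
      le_rfl (by omega)
    set M := (mrec (PySem.Chars.lower text.toList) (PySem.Chars.lower filter.toList) 0).1 with hM
    have hrun := runLoop text (PySem.Set.ofList M) ((text.toList.length : Nat) : Int) rfl M 0 []
      le_rfl hpos
      (fun q hq => by have := hprops.1 q hq; omega)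
      hprops.2.1
      (fun i _ => contains_ofList_int M i)
    rw [hrun]
    have he0 := mrec_end (PySem.Chars.lower text.toList) (PySem.Chars.lower filter.toList) 0
    rw [← hM] at he0
    rw [← he0]
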